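-- pv_equiv track=rewrite | github.com/kodsnack/advent_of_code_2017 | meldanya-python3/day16/day16.py | part2
-- ===== SOURCE A (Python) =====
-- def part1(moves, progs):
--     for m in moves.split(','):
--         if m[0] == 's':  # spin
--             v = int(m[1:])
--             progs = progs[-v:] + progs[:-v]
--         elif m[0] == 'x':  # exchange
--             a, b = [int(v) for v in m[1:].split('/')]
--             progs[a], progs[b] = progs[b], progs[a]
--         elif m[0] == 'p':  # partner
--             a, b = m[1:].split('/')
--             a = progs.index(a)
--             b = progs.index(b)
--             progs[a], progs[b] = progs[b], progs[a]
--     return progs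
--
-- def part2(moves):
--     # Find cycle
--     progs = list('abcdefghijklmnop')
--     seen = set()
--     while tuple(progs) not in seen:
--         seen.add(tuple(progs))
--         progs = part1(moves, progs)
--     # Run program 1e9 % number of cycles
--     progs = list('abcdefghijklmnop')
--     for i in range(int(1e9 % len(seen))):
--         progs = part1(moves, progs)
--     return progs
-- ===== SOURCE B (Python) =====
-- def part2(moves):
--     # Parse the move list ONCE into structured instructions, then interpret;
--     # record the whole trajectory in a list (dict for O(1) membership) and
--     # index straight into it instead of replaying the dance a second time.
--     prog = []
--     for m in moves.split(','):
--         if m[0] == 's':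
--             prog.append(('s', int(m[1:]), 0))
--         elif m[0] == 'x':
--             a, b = m[1:].split('/')
--             prog.append(('x', int(a), int(b)))
--         elif m[0] == 'p':
--             a, b = m[1:].split('/')
--             prog.append(('p', a, b))
--
--     def dance(ps):
--         ps = list(ps)
--         for op, a, b in prog:
--             if op == 's':
--                 ps = ps[-a:] + ps[:-a]
--             elif op == 'x':
--                 ps[a], ps[b] = ps[b], ps[a]
--             else:
--                 i, j = ps.index(a), ps.index(b)
--                 ps[i], ps[j] = ps[j], ps[i]
--         return ps
--
--     traj = []
--     seen = {}
--     s = tuple('abcdefghijklmnop')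
--     while s not in seen:
--         seen[s] = len(traj)
--         traj.append(s)
--         s = tuple(dance(s))
--     return list(traj[1000000000 % len(traj)])
-- ===== Notes on version B (the rewrite author's own statement) =====
-- stated objective: alternative
-- what changed: A re-parses the move strings on every dance and, after detecting the cycle with a set, replays the dance from scratch for int(1e9 % L) more iterations; B parses the moves once into a structured instruction list, interprets it, memoises the whole trajectory (list + dict index) in a single detection loop and returns traj[1000000000 % len(traj)] directly, removing both the repeated parsing and the second replay pass.
import Mathlib
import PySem

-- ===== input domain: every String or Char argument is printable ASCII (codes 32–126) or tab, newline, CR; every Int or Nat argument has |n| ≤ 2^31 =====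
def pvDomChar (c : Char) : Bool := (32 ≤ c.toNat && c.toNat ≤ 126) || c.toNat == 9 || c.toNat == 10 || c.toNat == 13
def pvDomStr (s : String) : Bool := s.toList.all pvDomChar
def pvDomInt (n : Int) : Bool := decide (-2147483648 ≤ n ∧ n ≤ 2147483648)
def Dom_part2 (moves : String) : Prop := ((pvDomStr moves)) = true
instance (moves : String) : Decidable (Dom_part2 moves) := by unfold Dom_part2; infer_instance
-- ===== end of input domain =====

-- B parses the moves once into structured instructions, memoises the trajectory in one
-- loop (list + dict index) and indexes into it, instead of A's re-parsing dance, set-based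
-- detection and second replay loop (objective: alternative decomposition, no speed claim).

-- ===== PORT A =====
-- list('abcdefghijklmnop')
def startProgs : List String :=
  ["a","b","c","d","e","f","g","h","i","j","k","l","m","n","o","p"]

-- one dance move m applied to progs (the body of part1's for-loop); branch defaults
-- (returning progs unchanged) sit exactly where the Python raises — excluded by Pre_part2
def danceMove (progs : List String) (m : String) : List String :=
  match PySem.Str.pyGet? m 0 with
  | none => progs                                   -- m[0]: IndexError on an empty token
  | some c =>
    if c = 's' then                                 -- spin
      match PySem.Int.ofStr? (PySem.Str.slice m (some 1) none) with
      | none => progs                               -- int(m[1:]): ValueError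
      | some v =>
        PySem.List.slice progs (some (-v)) none ++ PySem.List.slice progs none (some (-v))
    else if c = 'x' then                            -- exchange
      match (PySem.Str.split? (PySem.Str.slice m (some 1) none) "/").getD [] with
      | [sa, sb] =>
        match PySem.Int.ofStr? sa, PySem.Int.ofStr? sb with
        | some a, some b =>
          match PySem.List.pyGet? progs a, PySem.List.pyGet? progs b with
          | some pa, some pb => PySem.List.pySetD (PySem.List.pySetD progs a pb) b pa
          | _, _ => progs                           -- IndexError
        | _, _ => progs                             -- int(v): ValueError
      | _ => progs                                  -- unpacking: ValueError
    else if c = 'p' then                            -- partner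
      match (PySem.Str.split? (PySem.Str.slice m (some 1) none) "/").getD [] with
      | [sa, sb] =>
        match PySem.List.index? progs sa, PySem.List.index? progs sb with
        | some a, some b =>
          match PySem.List.pyGet? progs (a : Int), PySem.List.pyGet? progs (b : Int) with
          | some pa, some pb =>
            PySem.List.pySetD (PySem.List.pySetD progs (a : Int) pb) (b : Int) pa
          | _, _ => progs
        | _, _ => progs                             -- .index: ValueError
      | _ => progs                                  -- unpacking: ValueError
    else progs

-- the module's part1 helper
def part1 (moves : String) (progs : List String) : List String :=
  ((PySem.Str.split? moves ",").getD []).foldl danceMove progs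

-- A's 'while tuple(progs) not in seen' loop; fuel 16!+1 bounds the number of
-- iterations (all reachable states are lists of the 16 letters), a totality guard only
def findCycleA (f : List String → List String) :
    Nat → PySem.Set (List String) → List String → PySem.Set (List String)
  | 0, seen, _ => seen
  | fuel+1, seen, progs =>
    if PySem.Set.contains seen progs then seen
    else findCycleA f fuel (PySem.Set.add seen progs) (f progs)

-- int(1e9 % len(seen)) : 1e9 and len(seen) < 2^53 are exact floats and fmod is exact,
-- so the Python float expression equals the integer 10^9 mod len(seen)
def part2 (moves : String) : List String :=
  let seen := findCycleA (part1 moves) 20922789888001 PySem.Set.empty startProgs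
  let k : Int := PySem.Int.mod 1000000000 (PySem.Set.len seen)
  (PySem.List.pyRange 0 k 1).foldl (fun progs _ => part1 moves progs) startProgs

-- ===== PORT B =====
-- B's structured instructions: ('s', v, 0) | ('x', a, b) | ('p', a, b)
inductive Ins
  | spin : Int → Ins
  | exch : Int → Int → Ins
  | part : String → String → Ins
deriving DecidableEq, Repr

-- one iteration of B's parsing loop: the instruction appended for token m, if any
-- (none = the token is skipped, or the Python raises there — outside Pre_part2)
def parseMove (m : String) : Option Ins :=
  match PySem.Str.pyGet? m 0 with
  | none => none
  | some c =>
    if c = 's' then (PySem.Int.ofStr? (PySem.Str.slice m (some 1) none)).map Ins.spin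
    else if c = 'x' then
      match (PySem.Str.split? (PySem.Str.slice m (some 1) none) "/").getD [] with
      | [sa, sb] =>
        match PySem.Int.ofStr? sa, PySem.Int.ofStr? sb with
        | some a, some b => some (Ins.exch a b)
        | _, _ => none
      | _ => none
    else if c = 'p' then
      match (PySem.Str.split? (PySem.Str.slice m (some 1) none) "/").getD [] with
      | [sa, sb] => some (Ins.part sa sb)
      | _ => none
    else none

-- 'prog = []; for m in moves.split(','): … append …'
def parseProg (moves : String) : List Ins :=
  ((PySem.Str.split? moves ",").getD []).filterMap parseMove

-- the body of B's interpreter loop (defaults where the Python raises — outside Pre_part2)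
def applyIns (ps : List String) : Ins → List String
  | Ins.spin v =>
    PySem.List.slice ps (some (-v)) none ++ PySem.List.slice ps none (some (-v))
  | Ins.exch a b =>
    match PySem.List.pyGet? ps a, PySem.List.pyGet? ps b with
    | some pa, some pb => PySem.List.pySetD (PySem.List.pySetD ps a pb) b pa
    | _, _ => ps
  | Ins.part a b =>
    match PySem.List.index? ps a, PySem.List.index? ps b with
    | some i, some j =>
      match PySem.List.pyGet? ps (i : Int), PySem.List.pyGet? ps (j : Int) with
      | some pa, some pb =>
        PySem.List.pySetD (PySem.List.pySetD ps (i : Int) pb) (j : Int) pa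
      | _, _ => ps
    | _, _ => ps

-- B's dance(ps): interpret the pre-parsed instruction list
def danceB (prog : List Ins) (ps : List String) : List String :=
  prog.foldl applyIns ps

-- B's 'while s not in seen' loop, recording the trajectory and a dict index; same fuel guard
def findTrajB (f : List String → List String) :
    Nat → List (List String) → PySem.Dict (List String) Int → List String → List (List String)
  | 0, traj, _, _ => traj
  | fuel+1, traj, seen, s =>
    if PySem.Dict.contains seen s then traj
    else findTrajB f fuel (traj ++ [s]) (PySem.Dict.insert seen s (PySem.List.len traj)) (f s)

-- traj[1000000000 % len(traj)]; the index is in range, so getD's default is never used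
def part2_alt (moves : String) : List String :=
  let traj := findTrajB (danceB (parseProg moves)) 20922789888001 [] PySem.Dict.empty startProgs
  (PySem.List.pyGet? traj (PySem.Int.mod 1000000000 (PySem.List.len traj))).getD []

-- ===== PRECONDITION & SPEC =====
-- Pre_part2 excludes exactly the inputs where the Python raises: an empty dance token
-- (IndexError), an s/x token whose argument does not int()-parse or an x/p token without
-- exactly two '/'-parts (ValueError), an x index outside [-16,15] (IndexError), or a
-- p name that is not one of the letters a..p (ValueError from .index).
def validMove (m : String) : Bool :=
  match PySem.Str.pyGet? m 0 with
  | none => false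
  | some c =>
    if c = 's' then (PySem.Int.ofStr? (PySem.Str.slice m (some 1) none)).isSome
    else if c = 'x' then
      match (PySem.Str.split? (PySem.Str.slice m (some 1) none) "/").getD [] with
      | [sa, sb] =>
        match PySem.Int.ofStr? sa, PySem.Int.ofStr? sb with
        | some a, some b => decide (-16 ≤ a ∧ a < 16 ∧ -16 ≤ b ∧ b < 16)
        | _, _ => false
      | _ => false
    else if c = 'p' then
      match (PySem.Str.split? (PySem.Str.slice m (some 1) none) "/").getD [] with
      | [sa, sb] => decide (sa ∈ startProgs) && decide (sb ∈ startProgs)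
      | _ => false
    else true

def Pre_part2 (moves : String) : Prop :=
  (((PySem.Str.split? moves ",").getD []).all validMove) = true
instance (moves : String) : Decidable (Pre_part2 moves) := by unfold Pre_part2; infer_instance

def pvWitness_part2 : String := "s3,x0/15,pa/b"

def Spec_part2 (moves : String) (out : List String) : Prop := out = part2_alt moves
instance (moves : String) (out : List String) : Decidable (Spec_part2 moves out) := by unfold Spec_part2; infer_instance

-- ===== CLAIM (what is proved, stated in full; the proofs are below) =====
def Claim_equal_part2 : Prop := ∀ (moves : String), Dom_part2 moves → Pre_part2 moves → Spec_part2 moves (part2 moves)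

-- ===== LEMMAS AND PROOFS =====

-- on a valid token, one step of B's parse-then-interpret equals A's danceMove
-- (a skipped token parses to none and danceMove leaves progs unchanged)
theorem parse_apply_eq (m : String) (h : validMove m = true) (ps : List String) :
    (parseMove m).elim ps (applyIns ps) = danceMove ps m := by
  unfold validMove at h
  unfold parseMove
  cases hg : PySem.Str.pyGet? m 0 with
  | none => rw [hg] at h; simp at h
  | some c =>
    rw [hg] at h
    unfold danceMove
    rw [hg]
    by_cases hs : c = 's'
    · simp only [hs, if_true] at h ⊢
      obtain ⟨v, hv⟩ := Option.isSome_iff_exists.mp h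
      simp [hv, applyIns]
    · by_cases hx : c = 'x'
      · simp only [hx, if_true] at h ⊢
        cases hsp : (PySem.Str.split? (PySem.Str.slice m (some 1) none) "/").getD [] with
        | nil => rw [hsp] at h; simp at h
        | cons sa rest =>
          cases rest with
          | nil => rw [hsp] at h; simp at h
          | cons sb rest2 =>
            cases rest2 with
            | cons _ _ => rw [hsp] at h; simp at h
            | nil =>
              rw [hsp] at h
              cases ha : PySem.Int.ofStr? sa with
              | none => exfalso; simp [ha] at h
              | some a =>
                cases hb : PySem.Int.ofStr? sb with
                | none => exfalso; simp [ha, hb] at h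
                | some b => simp [ha, hb, applyIns]
      · by_cases hp : c = 'p'
        · simp only [hp, if_true] at h ⊢
          cases hsp : (PySem.Str.split? (PySem.Str.slice m (some 1) none) "/").getD [] with
          | nil => rw [hsp] at h; simp at h
          | cons sa rest =>
            cases rest with
            | nil => rw [hsp] at h; simp at h
            | cons sb rest2 =>
              cases rest2 with
              | cons _ _ => rw [hsp] at h; simp at h
              | nil => simp [applyIns]
        · simp [hs, hx, hp]

-- interpreting B's parsed program is A's per-dance loop, token by token
theorem foldl_parse_eq (ts : List String) (h : ∀ x ∈ ts, validMove x = true) :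
    ∀ ps, (ts.filterMap parseMove).foldl applyIns ps = ts.foldl danceMove ps := by
  induction ts with
  | nil => intro ps; rfl
  | cons t ts ih =>
    intro ps
    have hstep := parse_apply_eq t (h t (by simp)) ps
    cases hp : parseMove t with
    | none =>
      rw [hp] at hstep
      simp only [List.filterMap_cons, hp, List.foldl_cons, ← hstep]
      exact ih (fun x hx => h x (by simp [hx])) ps
    | some i =>
      rw [hp] at hstep
      simp only [List.filterMap_cons, hp, List.foldl_cons]
      rw [show applyIns ps i = danceMove ps t from hstep]
      exact ih (fun x hx => h x (by simp [hx])) _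

-- B's dance on the parsed program is the module's part1
theorem danceB_eq_part1 (moves : String) (h : Pre_part2 moves) :
    ∀ ps, danceB (parseProg moves) ps = part1 moves ps := by
  unfold Pre_part2 at h
  rw [List.all_eq_true] at h
  intro ps
  exact foldl_parse_eq _ (fun x hx => by simpa using h x hx) ps

-- A's set-based loop and B's dict-indexed loop build the same trajectory list,
-- as long as the dict's keys are exactly the accumulated states
theorem findTrajB_eq_findCycleA (f : List String → List String) :
    ∀ (n : Nat) (acc : List (List String)) (d : PySem.Dict (List String) Int) (p : List String),
      (∀ x, PySem.Dict.contains d x = acc.contains x) →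
      findTrajB f n acc d p = findCycleA f n acc p := by
  intro n
  induction n with
  | zero => intro acc d p _; rfl
  | succ n ih =>
    intro acc d p hd
    simp only [findTrajB, findCycleA, PySem.Set.contains_eq_listContains, hd]
    by_cases h : p ∈ acc
    · simp [h]
    · have hc : acc.contains p = false := by simpa using h
      simp only [hc, PySem.Set.add, PySem.Set.contains_eq_listContains,
        Bool.false_eq_true, if_false]
      exact ih (acc ++ [p]) _ (f p) (by
        intro x
        rw [PySem.Dict.contains_insert, hd]
        simp only [List.contains_eq_mem, List.mem_append, List.mem_singleton]
        cases hxp : (x == p) <;> simp_all [Bool.or_comm])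

-- A's detection loop appends the successive iterates of p to its accumulator
theorem findCycleA_spec (f : List String → List String) :
    ∀ (n : Nat) (acc : List (List String)) (p : List String),
      ∃ t, findCycleA f n acc p = acc ++ t ∧
        ∀ k, (hk : k < t.length) → t[k] = f^[k] p := by
  intro n
  induction n with
  | zero => intro acc p; exact ⟨[], by simp [findCycleA]⟩
  | succ n ih =>
    intro acc p
    by_cases h : p ∈ acc
    · exact ⟨[], by simp [findCycleA, PySem.Set.contains_eq_listContains, h]⟩
    · obtain ⟨t, ht, hidx⟩ := ih (acc ++ [p]) (f p)
      refine ⟨p :: t, ?_, ?_⟩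
      · simpa [findCycleA, PySem.Set.contains_eq_listContains, h, PySem.Set.add] using ht
      · intro k hk
        cases k with
        | zero => simp
        | succ k =>
          simp only [List.getElem_cons_succ, Function.iterate_succ_apply]
          exact hidx k (by simpa using hk)

-- with one unit of fuel and an empty accumulator the trajectory is nonempty
theorem findCycleA_ne_nil (f : List String → List String) (n : Nat) (p : List String) :
    findCycleA f (n+1) PySem.Set.empty p ≠ [] := by
  simp only [findCycleA, PySem.Set.contains_eq_listContains, PySem.Set.empty]
  simp only [List.contains_eq_mem, List.not_mem_nil, decide_false, Bool.false_eq_true, if_false]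
  obtain ⟨t, ht, -⟩ := findCycleA_spec f n [p] (f p)
  have : PySem.Set.add ([] : PySem.Set (List String)) p = [p] := rfl
  rw [this]
  simp [ht]

-- a for-loop that ignores its index iterates its body once per element
theorem foldl_ignore_iterate {β : Type} (f : List String → List String) :
    ∀ (l : List β) (x : List String), l.foldl (fun p _ => f p) x = f^[l.length] x := by
  intro l
  induction l with
  | nil => intro x; rfl
  | cons a l ih => intro x; simp [List.foldl_cons, ih, Function.iterate_succ_apply]

-- ===== VERDICT (by name: the statement is the Claim_ definition above) =====
theorem part2_spec : Claim_equal_part2 := by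
  intro moves _ hpre
  unfold Spec_part2 part2 part2_alt
  have hf : danceB (parseProg moves) = part1 moves := funext (danceB_eq_part1 moves hpre)
  rw [hf]
  rw [findTrajB_eq_findCycleA (part1 moves) _ [] PySem.Dict.empty startProgs
      (by intro x; simp [PySem.Dict.contains_empty])]
  have hemp : (PySem.Set.empty : PySem.Set (List String)) = [] := rfl
  obtain ⟨t, ht, hidx⟩ := findCycleA_spec (part1 moves) 20922789888001 [] startProgs
  have ht' : findCycleA (part1 moves) 20922789888001 PySem.Set.empty startProgs = t := by
    rw [hemp, ht]; simp
  have hne : t ≠ [] := by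
    have := findCycleA_ne_nil (part1 moves) 20922789888000 startProgs
    rw [ht'] at this; exact this
  have hlen : 0 < t.length := List.length_pos_iff.mpr hne
  rw [hemp, ht]
  simp only [List.nil_append]
  have hset : PySem.Set.len t = (t.length : Int) := by simp [PySem.Set.len]
  have hlist : PySem.List.len t = (t.length : Int) := PySem.List.len_eq t
  rw [hset, hlist]
  have hpos : (0 : Int) < (t.length : Int) := by exact_mod_cast hlen
  have hmod : PySem.Int.mod 1000000000 (t.length : Int) = 1000000000 % (t.length : Int) :=
    PySem.Int.mod_eq_emod_of_pos hpos
  rw [hmod]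
  set k : Int := 1000000000 % (t.length : Int) with hk
  have hk0 : 0 ≤ k := Int.emod_nonneg _ (by omega)
  have hklt : k < (t.length : Int) := Int.emod_lt_of_pos _ hpos
  have hkn : k.toNat < t.length := by omega
  rw [PySem.List.pyGet?_of_nonneg t hk0, List.getElem?_eq_getElem hkn]
  rw [foldl_ignore_iterate, PySem.List.length_pyRange_one]
  simp [hidx k.toNat hkn]
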